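-- pv_equiv track=rewrite | github.com/Pandaemonium/CausalOctonionGraph | calc/sedenion_gen.py | cayley_dickson_table
-- ===== SOURCE A (Python) =====
-- from typing import Dict, FrozenSet, List, Set, Tuple
--
-- def cayley_dickson_table(n_doublings: int) -> List[List[Tuple[int, int]]]:
--     """
--     Build the multiplication table for the 2^n_doublings-dimensional
--     Cayley-Dickson algebra.
--
--     Returns table[i][j] = (sign, index)  meaning  e_i * e_j = sign * e_index,
--     with sign in {-1, +1}.
--
--     At each doubling step (old_dim -> 2*old_dim):
--       Lower half:  indices 0..old_dim-1         represent  (e_i, 0)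
--       Upper half:  indices old_dim..2*old_dim-1  represent  (0, e_{i-old_dim})
--
--     Product rules from (a, b)(c, d) = (ac - d*conj(b),  da + b*conj(c)):
--       LL: (e_i,0)(e_j,0)       = (e_i*e_j, 0)
--       LU: (e_i,0)(0,e_{j'})    = (0, e_{j'}*e_i)
--       UL: (0,e_{i'})(e_j,0)    = conj_sign(j) * (0, e_{i'}*e_j)
--       UU: (0,e_{i'})(0,e_{j'}) = -conj_sign(j') * (e_{j'}*e_{i'}, 0)
--     where conj_sign(k) = +1 if k==0 else -1.
--     """
--     table: List[List[Tuple[int, int]]] = [[(1, 0)]]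
--
--     for _ in range(n_doublings):
--         old_dim = len(table)
--         new_dim = 2 * old_dim
--         new_table: List[List[Tuple[int, int]]] = [
--             [(0, 0)] * new_dim for _ in range(new_dim)
--         ]
--
--         def conj_sign(idx: int) -> int:
--             return 1 if idx == 0 else -1
--
--         for i in range(new_dim):
--             for j in range(new_dim):
--                 i_low = i < old_dim
--                 j_low = j < old_dim
--                 if i_low and j_low:
--                     s, k = table[i][j]
--                     new_table[i][j] = (s, k)
--                 elif i_low and not j_low:
--                     jp = j - old_dim
--                     s, k = table[jp][i]
--                     new_table[i][j] = (s, k + old_dim)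
--                 elif not i_low and j_low:
--                     ip = i - old_dim
--                     s, k = table[ip][j]
--                     new_table[i][j] = (s * conj_sign(j), k + old_dim)
--                 else:
--                     ip = i - old_dim
--                     jp = j - old_dim
--                     s, k = table[jp][ip]
--                     new_table[i][j] = (-s * conj_sign(jp), k)
--
--         table = new_table
--
--     return table
-- ===== SOURCE B (Python) =====
-- def cayley_dickson_table(n_doublings):
--     """Top-down recursion on the dimension: the table of dimension dim is
--     composed from the four quadrant blocks derived from the table of dimension
--     dim // 2 (instead of A's iterative loop that rebuilds the table cell by
--     cell with index branching).  A negative count means no doublings, as A's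
--     empty range does."""
--     def conj_sign(k):
--         return 1 if k == 0 else -1
--
--     def build(dim):
--         if dim <= 1:
--             return [[(1, 0)]]
--         half = dim // 2
--         t = build(half)
--         lower = [
--             [t[i][j] for j in range(half)]
--             + [(t[jp][i][0], t[jp][i][1] + half) for jp in range(half)]
--             for i in range(half)
--         ]
--         upper = [
--             [(t[ip][j][0] * conj_sign(j), t[ip][j][1] + half) for j in range(half)]
--             + [(-t[jp][ip][0] * conj_sign(jp), t[jp][ip][1]) for jp in range(half)]
--             for ip in range(half)
--         ]
--         return lower + upper
--
--     return build(2 ** max(0, n_doublings))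
-- ===== Notes on version B (the rewrite author's own statement) =====
-- stated objective: alternative
-- what changed: Replaces A's iterative loop, which rebuilds the full table cell by cell with four-way index branching at each doubling step, with a top-down recursion build(dim) that composes the table from the four quadrant blocks of build(dim // 2); a negative count means no doublings, as A's empty range does.
import Mathlib
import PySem

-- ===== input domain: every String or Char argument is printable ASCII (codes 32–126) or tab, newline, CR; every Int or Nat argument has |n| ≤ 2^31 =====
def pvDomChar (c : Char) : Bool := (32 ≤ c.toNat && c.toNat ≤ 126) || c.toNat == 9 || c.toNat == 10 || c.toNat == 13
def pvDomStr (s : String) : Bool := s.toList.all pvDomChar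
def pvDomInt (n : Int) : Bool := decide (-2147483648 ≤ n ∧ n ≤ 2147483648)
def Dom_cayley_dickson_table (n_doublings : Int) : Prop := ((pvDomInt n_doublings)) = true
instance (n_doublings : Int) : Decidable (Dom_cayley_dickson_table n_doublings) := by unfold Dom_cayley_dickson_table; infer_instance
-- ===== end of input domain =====

-- B builds the table by top-down recursion on the dimension, composing it from the
-- four quadrant blocks of the half-size table, instead of A's iterative rebuild of
-- the full table cell by cell with index branching ('alternative': same cost).

-- ===== PORT A =====
-- one doubling step of A: from `table` build the 2x-sized table cell by cell
def cdStep (table : List (List (Int × Int))) : List (List (Int × Int)) :=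
  let old_dim := table.length
  let new_dim := 2 * old_dim
  (List.range new_dim).map (fun i =>
    (List.range new_dim).map (fun j =>
      if i < old_dim then
        if j < old_dim then
          (table.getD i []).getD j (0, 0)
        else
          let jp := j - old_dim
          let sk := (table.getD jp []).getD i (0, 0)
          (sk.1, sk.2 + (old_dim : Int))
      else
        if j < old_dim then
          let ip := i - old_dim
          let sk := (table.getD ip []).getD j (0, 0)
          (sk.1 * (if j = 0 then (1 : Int) else -1), sk.2 + (old_dim : Int))
        else
          let ip := i - old_dim
          let jp := j - old_dim
          let sk := (table.getD jp []).getD ip (0, 0)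
          (-sk.1 * (if jp = 0 then (1 : Int) else -1), sk.2)))

def cayley_dickson_table (n_doublings : Int) : List (List (Int × Int)) :=
  (List.range n_doublings.toNat).foldl (fun table _ => cdStep table) [[(1, 0)]]

-- ===== PORT B =====
-- build(dim): the table of dimension dim composed block-wise from build(dim // 2)
def cdBuild (dim : Nat) : List (List (Int × Int)) :=
  if dim ≤ 1 then [[(1, 0)]]
  else
    let half := dim / 2
    let t := cdBuild half
    let lower := (List.range half).map (fun i =>
      (List.range half).map (fun j => (t.getD i []).getD j (0, 0)) ++
      (List.range half).map (fun jp =>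
        let sk := (t.getD jp []).getD i (0, 0)
        (sk.1, sk.2 + (half : Int))))
    let upper := (List.range half).map (fun ip =>
      (List.range half).map (fun j =>
        let sk := (t.getD ip []).getD j (0, 0)
        (sk.1 * (if j = 0 then (1 : Int) else -1), sk.2 + (half : Int))) ++
      (List.range half).map (fun jp =>
        let sk := (t.getD jp []).getD ip (0, 0)
        (-sk.1 * (if jp = 0 then (1 : Int) else -1), sk.2)))
    lower ++ upper
termination_by dim
decreasing_by omega

def cayley_dickson_table_alt (n_doublings : Int) : List (List (Int × Int)) :=
  cdBuild (2 ^ (max 0 n_doublings).toNat)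

-- ===== PRECONDITION & SPEC =====
def Spec_cayley_dickson_table (n_doublings : Int) (out : List (List (Int × Int))) : Prop := out = cayley_dickson_table_alt n_doublings
instance (n_doublings : Int) (out : List (List (Int × Int))) : Decidable (Spec_cayley_dickson_table n_doublings out) := by unfold Spec_cayley_dickson_table; infer_instance

-- ===== CLAIM (what is proved, stated in full; the proofs are below) =====
def Claim_equal_cayley_dickson_table : Prop := ∀ (n_doublings : Int), Dom_cayley_dickson_table n_doublings → Spec_cayley_dickson_table n_doublings (cayley_dickson_table n_doublings)

-- ===== LEMMAS AND PROOFS =====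

theorem cdBuild_even_length (d : Nat) (hd : 1 ≤ d) : (cdBuild (2 * d)).length = 2 * d := by
  rw [cdBuild]
  have h1 : ¬ (2 * d ≤ 1) := by omega
  have h2 : 2 * d / 2 = d := by omega
  simp only [h1, if_false, h2, List.length_append, List.length_map, List.length_range]
  omega

theorem cdBuild_pow_length (m : Nat) : (cdBuild (2 ^ m)).length = 2 ^ m := by
  cases m with
  | zero => rw [pow_zero, cdBuild]; simp
  | succ k =>
      have h : 2 ^ (k + 1) = 2 * 2 ^ k := by rw [pow_succ]; ring
      rw [h, cdBuild_even_length (2 ^ k) Nat.one_le_two_pow]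

theorem cdStep_cdBuild (d : Nat) (hd : 1 ≤ d) (hlen : (cdBuild d).length = d) :
    cdStep (cdBuild d) = cdBuild (2 * d) := by
  conv_rhs => rw [cdBuild]
  have h1 : ¬ (2 * d ≤ 1) := by omega
  have h2 : 2 * d / 2 = d := by omega
  simp only [h1, if_false, h2]
  unfold cdStep
  simp only [hlen]
  have hdd : 2 * d = d + d := by ring
  rw [hdd, List.range_add, List.map_append, List.map_map]
  congr 1
  · -- lower rows: i < d
    apply List.map_congr_left
    intro i hi
    rw [List.mem_range] at hi
    rw [List.map_append, List.map_map]
    congr 1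
    · apply List.map_congr_left
      intro j hj
      rw [List.mem_range] at hj
      simp only [hi, hj, if_true]
    · apply List.map_congr_left
      intro jp hjp
      rw [List.mem_range] at hjp
      have hnot : ¬ (d + jp < d) := by omega
      have hsub : d + jp - d = jp := by omega
      simp only [Function.comp, hi, if_true, hnot, if_false, hsub]
  · -- upper rows: i = d + ip
    apply List.map_congr_left
    intro ip hip
    rw [List.mem_range] at hip
    have hnoti : ¬ (d + ip < d) := by omega
    have hsubi : d + ip - d = ip := by omega
    simp only [Function.comp, hnoti, if_false, hsubi]
    rw [List.map_append, List.map_map]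
    congr 1
    · apply List.map_congr_left
      intro j hj
      rw [List.mem_range] at hj
      simp only [hj, if_true]
    · apply List.map_congr_left
      intro jp hjp
      rw [List.mem_range] at hjp
      have hnot : ¬ (d + jp < d) := by omega
      have hsub : d + jp - d = jp := by omega
      simp only [Function.comp, hnot, if_false, hsub]

theorem foldl_cdStep (m : Nat) :
    (List.range m).foldl (fun table _ => cdStep table) [[(1, 0)]] = cdBuild (2 ^ m) := by
  induction m with
  | zero =>
      rw [List.range_zero, List.foldl_nil, pow_zero, cdBuild]
      simp
  | succ k ih =>
      rw [List.range_succ, List.foldl_append, ih]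
      simp only [List.foldl_cons, List.foldl_nil]
      rw [cdStep_cdBuild (2 ^ k) Nat.one_le_two_pow (cdBuild_pow_length k)]
      congr 1
      rw [pow_succ]
      ring

theorem toNat_max (n : Int) : (max 0 n).toNat = n.toNat := by
  rcases le_total 0 n with h | h
  · rw [max_eq_right h]
  · rw [max_eq_left h]
    omega

-- ===== VERDICT (by name: the statement is the Claim_ definition above) =====
theorem cayley_dickson_table_spec : Claim_equal_cayley_dickson_table := by
  intro n _
  unfold Spec_cayley_dickson_table cayley_dickson_table cayley_dickson_table_alt
  rw [foldl_cdStep, toNat_max]
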